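-- pv_equiv track=rewrite | github.com/moradology/django-pgjson | django_pgjson/lookups.py | containment_filter
-- ===== SOURCE A (Python) =====
-- def reconstruct_object(path):
--     """Construct the object from root to distant leaf, recursively"""
--     if len(path) == 0:
--         return '%s'
--     else:
--         return "{{{{%s: {recons}}}}}".format(recons=reconstruct_object(path[1:]))
--
-- def containment_filter(path, range_rule):
--     """Filter for objects that contain the specified value at some location"""
--     containment_path = reconstruct_object(path)
--     has_containment = 'contains' in range_rule
--     abstract_contains_str = " @> {filter_jobj}"
--
--     if has_containment:
--         all_contained = range_rule.get('contains')
--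
--     contains_str = ' AND '.join(['{{field}}' + abstract_contains_str.format(filter_jobj=containment_path)
--                                  for contained in all_contained])
--     contains_params = []
--     for contained in all_contained:
--         contains_params = contains_params + path + [str(contained)]
--
--     return (contains_str, contains_params)
-- ===== SOURCE B (Python) =====
-- def containment_filter(path, range_rule):
--     """Filter for objects that contain the specified value at some location"""
--     jobj = '%s'
--     for _ in range(len(path)):
--         jobj = '{{%s: ' + jobj + '}}'
--     vals = range_rule['contains']
--     clause = ' AND '.join(['{{field}} @> ' + jobj] * len(vals))
--     params = [p for v in vals for p in path + [str(v)]]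
--     return (clause, params)
-- ===== Notes on version B (the rewrite author's own statement) =====
-- stated objective: simpler
-- what changed: Replaces the recursive reconstruct_object helper with an inline iterative wrap loop, the per-element comprehension-plus-join with list multiplication by len(vals), and the quadratic repeated list concatenation for params with a single flattening comprehension. Pre_ excludes inputs without a 'contains' key, on which both A (UnboundLocalError) and B (KeyError) raise.
import Mathlib
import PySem

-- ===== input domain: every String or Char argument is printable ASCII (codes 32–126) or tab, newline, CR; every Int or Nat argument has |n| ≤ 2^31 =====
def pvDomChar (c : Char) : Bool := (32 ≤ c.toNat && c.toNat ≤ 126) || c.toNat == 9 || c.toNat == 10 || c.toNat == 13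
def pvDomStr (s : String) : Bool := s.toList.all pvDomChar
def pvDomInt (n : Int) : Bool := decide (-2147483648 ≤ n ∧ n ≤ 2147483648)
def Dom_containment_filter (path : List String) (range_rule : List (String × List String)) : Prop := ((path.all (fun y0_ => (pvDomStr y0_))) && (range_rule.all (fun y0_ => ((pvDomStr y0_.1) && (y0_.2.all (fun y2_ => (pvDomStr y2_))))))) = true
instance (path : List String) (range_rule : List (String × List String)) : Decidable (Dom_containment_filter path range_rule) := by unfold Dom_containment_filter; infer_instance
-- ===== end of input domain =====

-- B replaces the recursive helper by an inline wrap loop, the join comprehension by list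
-- multiplication, and the quadratic repeated concatenation for params by one flattening
-- comprehension (objective: simpler).

-- ===== PORT A =====
def reconstruct_object (path : List String) : String :=
  match path with
  | [] => "%s"
  | _ :: rest => "{{%s: " ++ reconstruct_object rest ++ "}}"

def containment_filter (path : List String) (range_rule : List (String × List String)) : String × List String :=
  let containment_path := reconstruct_object path
  -- under Pre_ the key "contains" is present; A raises UnboundLocalError otherwise
  let all_contained := (range_rule.lookup "contains").getD []
  let contains_str := PySem.Str.join " AND "
    (all_contained.map (fun _ => "{{field}}" ++ (" @> " ++ containment_path)))
  let contains_params := all_contained.foldl (fun acc c => acc ++ path ++ [c]) []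
  (contains_str, contains_params)

-- ===== PORT B =====
def containment_filter_alt (path : List String) (range_rule : List (String × List String)) : String × List String :=
  let jobj := (List.range path.length).foldl (fun acc _ => "{{%s: " ++ acc ++ "}}") "%s"
  -- under Pre_ the key "contains" is present; B raises KeyError otherwise
  let vals := (range_rule.lookup "contains").getD []
  let clause := PySem.Str.join " AND "
    (PySem.List.pyRepeat ["{{field}} @> " ++ jobj] (Int.ofNat vals.length))
  let params := vals.flatMap (fun v => path ++ [v])
  (clause, params)

-- ===== PRECONDITION & SPEC =====
-- Pre_ excludes inputs on which A raises: when "contains" is not a key of range_rule,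
-- all_contained is never assigned and A raises UnboundLocalError (B raises KeyError there).
def Pre_containment_filter (path : List String) (range_rule : List (String × List String)) : Prop :=
  "contains" ∈ range_rule.map Prod.fst
instance (path : List String) (range_rule : List (String × List String)) : Decidable (Pre_containment_filter path range_rule) := by unfold Pre_containment_filter; infer_instance

def pvWitness_containment_filter : List String × (List (String × List String)) :=
  (["a", "b"], [("contains", ["x", "y"])])

def Spec_containment_filter (path : List String) (range_rule : List (String × List String)) (out : String × List String) : Prop := out = containment_filter_alt path range_rule
instance (path : List String) (range_rule : List (String × List String)) (out : String × List String) : Decidable (Spec_containment_filter path range_rule out) := by unfold Spec_containment_filter; infer_instance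

-- ===== CLAIM (what is proved, stated in full; the proofs are below) =====
def Claim_equal_containment_filter : Prop := ∀ (path : List String) (range_rule : List (String × List String)), Dom_containment_filter path range_rule → Pre_containment_filter path range_rule → Spec_containment_filter path range_rule (containment_filter path range_rule)

-- ===== LEMMAS AND PROOFS =====
theorem wrap_loop_eq_recons (path : List String) :
    (List.range path.length).foldl (fun acc _ => "{{%s: " ++ acc ++ "}}") "%s"
      = reconstruct_object path := by
  induction path with
  | nil => rfl
  | cons x rest ih =>
      simp only [List.length_cons, List.range_succ, List.foldl_append, List.foldl_cons,
        List.foldl_nil, reconstruct_object, ih]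

theorem params_fold_eq_flatMap (path : List String) (l : List String) :
    l.foldl (fun acc c => acc ++ path ++ [c]) [] = l.flatMap (fun c => path ++ [c]) := by
  have h : (fun (acc : List String) (c : String) => acc ++ path ++ [c])
      = fun acc c => acc ++ (path ++ [c]) := by
    funext acc c; simp [List.append_assoc]
  rw [h, PySem.List.foldl_append_eq_flatMap]
  simp

-- ===== VERDICT (by name: the statement is the Claim_ definition above) =====
theorem containment_filter_spec : Claim_equal_containment_filter := by
  intro path range_rule _ _
  unfold Spec_containment_filter containment_filter containment_filter_alt
  have hs : ("{{field}}" : String) ++ " @> " = "{{field}} @> " := rfl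
  simp only [wrap_loop_eq_recons, params_fold_eq_flatMap, PySem.List.pyRepeat_singleton,
    List.map_const', ← String.append_assoc, hs]
  rfl
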